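-- pv_equiv track=rewrite | github.com/dlesser71n/cyber-pi | src/collectors/dark_web_intelligence_collector.py | extract_affected_platforms
-- ===== SOURCE A (Python) =====
-- from typing import List, Dict, Any, Optional
--
-- def extract_affected_platforms(text: str) -> List[str]:
--     """Extract affected platforms"""
--     platforms = []
--
--     platform_keywords = {
--         'Windows': ['windows', 'win', 'microsoft'],
--         'Linux': ['linux', 'ubuntu', 'debian', 'centos'],
--         'macOS': ['macos', 'mac', 'osx', 'apple'],
--         'Android': ['android', 'google'],
--         'iOS': ['ios', 'iphone', 'ipad', 'apple'],
--         'Web': ['web', 'website', 'http', 'https'],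
--         'Database': ['mysql', 'postgresql', 'oracle', 'sql server', 'mongodb'],
--         'Cloud': ['aws', 'azure', 'gcp', 'cloud']
--     }
--
--     for platform, keywords in platform_keywords.items():
--         if any(keyword in text.lower() for keyword in keywords):
--             platforms.append(platform)
--
--     return list(set(platforms))
-- ===== SOURCE B (Python) =====
-- from typing import List
--
--
-- # Inverted index: keyword -> platforms it indicates (grouped once, scanned in one
-- # flat pass over text.lower(); 'apple' belongs to both macOS and iOS).
-- _KEYWORD_PLATFORMS = [
--     ('windows', ['Windows']), ('win', ['Windows']), ('microsoft', ['Windows']),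
--     ('linux', ['Linux']), ('ubuntu', ['Linux']), ('debian', ['Linux']), ('centos', ['Linux']),
--     ('macos', ['macOS']), ('mac', ['macOS']), ('osx', ['macOS']), ('apple', ['macOS', 'iOS']),
--     ('android', ['Android']), ('google', ['Android']),
--     ('ios', ['iOS']), ('iphone', ['iOS']), ('ipad', ['iOS']),
--     ('web', ['Web']), ('website', ['Web']), ('http', ['Web']), ('https', ['Web']),
--     ('mysql', ['Database']), ('postgresql', ['Database']), ('oracle', ['Database']),
--     ('sql server', ['Database']), ('mongodb', ['Database']),
--     ('aws', ['Cloud']), ('azure', ['Cloud']), ('gcp', ['Cloud']), ('cloud', ['Cloud']),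
-- ]
--
--
-- def extract_affected_platforms(text: str) -> List[str]:
--     """Extract affected platforms (inverted keyword index, one pass, ordered dedup)."""
--     low = text.lower()
--     found: List[str] = []
--     for keyword, plats in _KEYWORD_PLATFORMS:
--         if keyword in low:
--             for p in plats:
--                 if p not in found:
--                     found.append(p)
--     return found
-- ===== Notes on version B (the rewrite author's own statement) =====
-- stated objective: alternative
-- what changed: Replaces the per-platform loop with an inner any() over keywords and a final list(set(...)) by a single flat pass over an inverted keyword-to-platforms index with an ordered dedup list; text.lower() is computed once instead of once per keyword test. Pre_ excludes texts in which keywords of two or more platforms occur, because there A's list(set(...)) ordering is an accident of the interpreter's hash seed.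
-- outside the precondition, e.g. on extract_affected_platforms('apple'): A returns ['iOS', 'macOS'], B returns ['macOS', 'iOS']; on extract_affected_platforms('apple google'): A returns ['Android', 'macOS', 'iOS'], B returns ['macOS', 'iOS', 'Android']
import Mathlib
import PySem

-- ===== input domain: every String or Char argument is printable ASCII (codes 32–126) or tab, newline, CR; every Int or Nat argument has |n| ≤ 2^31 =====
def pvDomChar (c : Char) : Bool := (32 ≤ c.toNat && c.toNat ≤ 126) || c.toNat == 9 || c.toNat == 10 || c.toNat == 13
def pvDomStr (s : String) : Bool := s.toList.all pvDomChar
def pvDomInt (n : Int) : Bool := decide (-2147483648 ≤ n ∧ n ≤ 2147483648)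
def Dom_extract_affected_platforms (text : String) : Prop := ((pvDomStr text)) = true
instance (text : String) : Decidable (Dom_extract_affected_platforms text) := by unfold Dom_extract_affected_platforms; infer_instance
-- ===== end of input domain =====

-- B replaces A's per-platform any()-scan plus list(set(...)) by one flat pass over an
-- inverted keyword→platforms index with an ordered dedup list (alternative decomposition;
-- equivalence is claimed on texts mentioning at most one platform, where list(set(...)) is deterministic).

-- ===== PORT A =====
def extract_affected_platforms (text : String) : List String :=
  let platforms : List String := []
  let platform_keywords : List (String × List String) :=
    [("Windows", ["windows", "win", "microsoft"]),
     ("Linux", ["linux", "ubuntu", "debian", "centos"]),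
     ("macOS", ["macos", "mac", "osx", "apple"]),
     ("Android", ["android", "google"]),
     ("iOS", ["ios", "iphone", "ipad", "apple"]),
     ("Web", ["web", "website", "http", "https"]),
     ("Database", ["mysql", "postgresql", "oracle", "sql server", "mongodb"]),
     ("Cloud", ["aws", "azure", "gcp", "cloud"])]
  let platforms := platform_keywords.foldl (fun platforms pk =>
    if pk.2.any (fun keyword => PySem.Str.isIn keyword (PySem.Str.lower text)) then
      platforms ++ [pk.1]
    else platforms) platforms
  -- list(set(platforms)): PySem.Set.ofList keeps first occurrences; Python's hash order is
  -- not modelled, which is exact under Pre_ (the set has at most one element there)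
  PySem.Set.ofList platforms

-- ===== PORT B =====
def extract_affected_platforms_alt (text : String) : List String :=
  let low := PySem.Str.lower text
  let keyword_platforms : List (String × List String) :=
    [("windows", ["Windows"]), ("win", ["Windows"]), ("microsoft", ["Windows"]),
     ("linux", ["Linux"]), ("ubuntu", ["Linux"]), ("debian", ["Linux"]), ("centos", ["Linux"]),
     ("macos", ["macOS"]), ("mac", ["macOS"]), ("osx", ["macOS"]), ("apple", ["macOS", "iOS"]),
     ("android", ["Android"]), ("google", ["Android"]),
     ("ios", ["iOS"]), ("iphone", ["iOS"]), ("ipad", ["iOS"]),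
     ("web", ["Web"]), ("website", ["Web"]), ("http", ["Web"]), ("https", ["Web"]),
     ("mysql", ["Database"]), ("postgresql", ["Database"]), ("oracle", ["Database"]),
     ("sql server", ["Database"]), ("mongodb", ["Database"]),
     ("aws", ["Cloud"]), ("azure", ["Cloud"]), ("gcp", ["Cloud"]), ("cloud", ["Cloud"])]
  keyword_platforms.foldl (fun found kp =>
    if PySem.Str.isIn kp.1 low then
      kp.2.foldl (fun found p => if found.contains p then found else found ++ [p]) found
    else found) []

-- ===== PRECONDITION & SPEC =====
-- pvGrp: does the text (lower-cased) mention any keyword of one platform group?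
def pvGrp (kws : List String) (text : String) : Bool :=
  kws.any (fun k => PySem.Str.isIn k (PySem.Str.lower text))

-- Pre_ excludes texts containing keywords of two or more platforms: there A's
-- list(set(...)) ordering is an accident of the interpreter's hash seed, so no single
-- return value can be claimed.
def Pre_extract_affected_platforms (text : String) : Prop :=
  ([pvGrp ["windows", "win", "microsoft"] text,
    pvGrp ["linux", "ubuntu", "debian", "centos"] text,
    pvGrp ["macos", "mac", "osx", "apple"] text,
    pvGrp ["android", "google"] text,
    pvGrp ["ios", "iphone", "ipad", "apple"] text,
    pvGrp ["web", "website", "http", "https"] text,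
    pvGrp ["mysql", "postgresql", "oracle", "sql server", "mongodb"] text,
    pvGrp ["aws", "azure", "gcp", "cloud"] text].count true) ≤ 1

instance (text : String) : Decidable (Pre_extract_affected_platforms text) := by
  unfold Pre_extract_affected_platforms; infer_instance

def pvWitness_extract_affected_platforms : String := "Ubuntu 22.04 privilege escalation"

def Spec_extract_affected_platforms (text : String) (out : List String) : Prop := out = extract_affected_platforms_alt text
instance (text : String) (out : List String) : Decidable (Spec_extract_affected_platforms text out) := by unfold Spec_extract_affected_platforms; infer_instance

-- ===== CLAIM (what is proved, stated in full; the proofs are below) =====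
def Claim_equal_extract_affected_platforms : Prop := ∀ (text : String), Dom_extract_affected_platforms text → Pre_extract_affected_platforms text → Spec_extract_affected_platforms text (extract_affected_platforms text)

-- ===== LEMMAS AND PROOFS =====

-- Pre_'s count bound, read as a 9-way case split: no group matches, or exactly one does.
set_option maxHeartbeats 1000000 in
lemma pv_count_cases (b1 b2 b3 b4 b5 b6 b7 b8 : Bool)
    (h : ([b1, b2, b3, b4, b5, b6, b7, b8].count true) ≤ 1) :
    (b1 = false ∧ b2 = false ∧ b3 = false ∧ b4 = false ∧ b5 = false ∧ b6 = false ∧ b7 = false ∧ b8 = false)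
    ∨ (b1 = true ∧ b2 = false ∧ b3 = false ∧ b4 = false ∧ b5 = false ∧ b6 = false ∧ b7 = false ∧ b8 = false)
    ∨ (b1 = false ∧ b2 = true ∧ b3 = false ∧ b4 = false ∧ b5 = false ∧ b6 = false ∧ b7 = false ∧ b8 = false)
    ∨ (b1 = false ∧ b2 = false ∧ b3 = true ∧ b4 = false ∧ b5 = false ∧ b6 = false ∧ b7 = false ∧ b8 = false)
    ∨ (b1 = false ∧ b2 = false ∧ b3 = false ∧ b4 = true ∧ b5 = false ∧ b6 = false ∧ b7 = false ∧ b8 = false)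
    ∨ (b1 = false ∧ b2 = false ∧ b3 = false ∧ b4 = false ∧ b5 = true ∧ b6 = false ∧ b7 = false ∧ b8 = false)
    ∨ (b1 = false ∧ b2 = false ∧ b3 = false ∧ b4 = false ∧ b5 = false ∧ b6 = true ∧ b7 = false ∧ b8 = false)
    ∨ (b1 = false ∧ b2 = false ∧ b3 = false ∧ b4 = false ∧ b5 = false ∧ b6 = false ∧ b7 = true ∧ b8 = false)
    ∨ (b1 = false ∧ b2 = false ∧ b3 = false ∧ b4 = false ∧ b5 = false ∧ b6 = false ∧ b7 = false ∧ b8 = true) := by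
  cases b1 <;> cases b2 <;> cases b3 <;> cases b4 <;> cases b5 <;> cases b6 <;> cases b7 <;> cases b8 <;> simp_all

-- ===== VERDICT (by name: the statement is the Claim_ definition above) =====
set_option maxHeartbeats 2000000 in
theorem extract_affected_platforms_spec : Claim_equal_extract_affected_platforms := by
  intro text _ hpre
  unfold Pre_extract_affected_platforms at hpre
  unfold Spec_extract_affected_platforms
  rcases pv_count_cases _ _ _ _ _ _ _ _ hpre with
    ⟨hg1, hg2, hg3, hg4, hg5, hg6, hg7, hg8⟩ |
    ⟨hg1, hg2, hg3, hg4, hg5, hg6, hg7, hg8⟩ |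
    ⟨hg1, hg2, hg3, hg4, hg5, hg6, hg7, hg8⟩ |
    ⟨hg1, hg2, hg3, hg4, hg5, hg6, hg7, hg8⟩ |
    ⟨hg1, hg2, hg3, hg4, hg5, hg6, hg7, hg8⟩ |
    ⟨hg1, hg2, hg3, hg4, hg5, hg6, hg7, hg8⟩ |
    ⟨hg1, hg2, hg3, hg4, hg5, hg6, hg7, hg8⟩ |
    ⟨hg1, hg2, hg3, hg4, hg5, hg6, hg7, hg8⟩ |
    ⟨hg1, hg2, hg3, hg4, hg5, hg6, hg7, hg8⟩
  · simp only [pvGrp, List.any_cons, List.any_nil, Bool.or_eq_false_iff, Bool.or_false] at hg1 hg2 hg3 hg4 hg5 hg6 hg7 hg8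
    simp_all [extract_affected_platforms, extract_affected_platforms_alt, PySem.Set.ofList]
  · clear hg1
    simp only [pvGrp, List.any_cons, List.any_nil, Bool.or_eq_false_iff, Bool.or_false] at hg2 hg3 hg4 hg5 hg6 hg7 hg8
    by_cases h1 : PySem.Str.isIn "windows" (PySem.Str.lower text) = true <;>
    by_cases h2 : PySem.Str.isIn "win" (PySem.Str.lower text) = true <;>
    by_cases h3 : PySem.Str.isIn "microsoft" (PySem.Str.lower text) = true <;>
    simp_all [extract_affected_platforms, extract_affected_platforms_alt, PySem.Set.ofList, PySem.Set.add]
  · clear hg2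
    simp only [pvGrp, List.any_cons, List.any_nil, Bool.or_eq_false_iff, Bool.or_false] at hg1 hg3 hg4 hg5 hg6 hg7 hg8
    by_cases h1 : PySem.Str.isIn "linux" (PySem.Str.lower text) = true <;>
    by_cases h2 : PySem.Str.isIn "ubuntu" (PySem.Str.lower text) = true <;>
    by_cases h3 : PySem.Str.isIn "debian" (PySem.Str.lower text) = true <;>
    by_cases h4 : PySem.Str.isIn "centos" (PySem.Str.lower text) = true <;>
    simp_all [extract_affected_platforms, extract_affected_platforms_alt, PySem.Set.ofList, PySem.Set.add]
  · clear hg3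
    simp only [pvGrp, List.any_cons, List.any_nil, Bool.or_eq_false_iff, Bool.or_false] at hg1 hg2 hg4 hg5 hg6 hg7 hg8
    by_cases h1 : PySem.Str.isIn "macos" (PySem.Str.lower text) = true <;>
    by_cases h2 : PySem.Str.isIn "mac" (PySem.Str.lower text) = true <;>
    by_cases h3 : PySem.Str.isIn "osx" (PySem.Str.lower text) = true <;>
    simp_all [extract_affected_platforms, extract_affected_platforms_alt, PySem.Set.ofList, PySem.Set.add]
  · clear hg4
    simp only [pvGrp, List.any_cons, List.any_nil, Bool.or_eq_false_iff, Bool.or_false] at hg1 hg2 hg3 hg5 hg6 hg7 hg8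
    by_cases h1 : PySem.Str.isIn "android" (PySem.Str.lower text) = true <;>
    by_cases h2 : PySem.Str.isIn "google" (PySem.Str.lower text) = true <;>
    simp_all [extract_affected_platforms, extract_affected_platforms_alt, PySem.Set.ofList, PySem.Set.add]
  · clear hg5
    simp only [pvGrp, List.any_cons, List.any_nil, Bool.or_eq_false_iff, Bool.or_false] at hg1 hg2 hg3 hg4 hg6 hg7 hg8
    by_cases h1 : PySem.Str.isIn "ios" (PySem.Str.lower text) = true <;>
    by_cases h2 : PySem.Str.isIn "iphone" (PySem.Str.lower text) = true <;>
    by_cases h3 : PySem.Str.isIn "ipad" (PySem.Str.lower text) = true <;>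
    simp_all [extract_affected_platforms, extract_affected_platforms_alt, PySem.Set.ofList, PySem.Set.add]
  · clear hg6
    simp only [pvGrp, List.any_cons, List.any_nil, Bool.or_eq_false_iff, Bool.or_false] at hg1 hg2 hg3 hg4 hg5 hg7 hg8
    by_cases h1 : PySem.Str.isIn "web" (PySem.Str.lower text) = true <;>
    by_cases h2 : PySem.Str.isIn "website" (PySem.Str.lower text) = true <;>
    by_cases h3 : PySem.Str.isIn "http" (PySem.Str.lower text) = true <;>
    by_cases h4 : PySem.Str.isIn "https" (PySem.Str.lower text) = true <;>
    simp_all [extract_affected_platforms, extract_affected_platforms_alt, PySem.Set.ofList, PySem.Set.add]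
  · clear hg7
    simp only [pvGrp, List.any_cons, List.any_nil, Bool.or_eq_false_iff, Bool.or_false] at hg1 hg2 hg3 hg4 hg5 hg6 hg8
    by_cases h1 : PySem.Str.isIn "mysql" (PySem.Str.lower text) = true <;>
    by_cases h2 : PySem.Str.isIn "postgresql" (PySem.Str.lower text) = true <;>
    by_cases h3 : PySem.Str.isIn "oracle" (PySem.Str.lower text) = true <;>
    by_cases h4 : PySem.Str.isIn "sql server" (PySem.Str.lower text) = true <;>
    by_cases h5 : PySem.Str.isIn "mongodb" (PySem.Str.lower text) = true <;>
    simp_all [extract_affected_platforms, extract_affected_platforms_alt, PySem.Set.ofList, PySem.Set.add]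
  · clear hg8
    simp only [pvGrp, List.any_cons, List.any_nil, Bool.or_eq_false_iff, Bool.or_false] at hg1 hg2 hg3 hg4 hg5 hg6 hg7
    by_cases h1 : PySem.Str.isIn "aws" (PySem.Str.lower text) = true <;>
    by_cases h2 : PySem.Str.isIn "azure" (PySem.Str.lower text) = true <;>
    by_cases h3 : PySem.Str.isIn "gcp" (PySem.Str.lower text) = true <;>
    by_cases h4 : PySem.Str.isIn "cloud" (PySem.Str.lower text) = true <;>
    simp_all [extract_affected_platforms, extract_affected_platforms_alt, PySem.Set.ofList, PySem.Set.add]
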